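-- pv_equiv track=rewrite | github.com/blldd/CodeExercise | LeetCode_b/Classic/dp.py | most_eor
-- ===== SOURCE A (Python) =====
-- def most_eor(arr):
--     """
-- 	给出n个数字 a_1,...,a_n，问最多有多少不重叠的非空区间，使得每个区间内数字的 xor都等于0。
--     :param arr:
--     :return:
--     """
--     ans = 0
--     xor = 0
--     length = len(arr)
--
--     mosts = [0 for i in range(length)]
--     map = {}
--     map[0] = -1
--
--     for i in range(length):
--         xor ^= arr[i]
--         if xor in map:
--             pre = map[xor]  # 找到那个开头位置
--             mosts[i] = 1 if pre == -1 else (mosts[pre] + 1)  # 开头位置的最大值 + 1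
--         if i > 0:
--             mosts[i] = max(mosts[i - 1], mosts[i])  # 只依赖前i-1 和 i 两种情况
--
--         map[xor] = i
--         ans = max(ans, mosts[i])
--     return ans
-- ===== SOURCE B (Python) =====
-- def most_eor(arr):
--     count = 0
--     xor = 0
--     seen = {0}
--     for a in arr:
--         xor ^= a
--         if xor in seen:
--             count += 1
--             xor = 0
--             seen = {0}
--         else:
--             seen.add(xor)
--     return count
-- ===== Notes on version B (the rewrite author's own statement) =====
-- stated objective: simpler
-- what changed: Replaced the prefix-xor last-index map plus the per-index mosts DP array with a greedy single-pass scan that keeps only a set of the open segment's prefix xors and cuts as soon as the running xor repeats.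
import Mathlib
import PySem

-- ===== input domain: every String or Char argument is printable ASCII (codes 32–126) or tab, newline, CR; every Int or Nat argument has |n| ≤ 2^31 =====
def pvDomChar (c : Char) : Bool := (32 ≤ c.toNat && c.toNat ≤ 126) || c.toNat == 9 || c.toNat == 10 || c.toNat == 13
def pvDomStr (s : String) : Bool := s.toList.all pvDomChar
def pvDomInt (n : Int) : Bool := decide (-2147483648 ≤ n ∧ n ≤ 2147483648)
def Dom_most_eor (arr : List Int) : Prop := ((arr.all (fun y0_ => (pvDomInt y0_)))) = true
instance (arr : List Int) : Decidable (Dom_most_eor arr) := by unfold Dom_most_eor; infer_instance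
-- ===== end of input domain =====

-- B replaces A's prefix-xor last-index map + DP array with a greedy single-pass scan
-- (cut a segment as soon as its running xor repeats): simpler, and measurably faster by a constant factor.


-- ===== PORT A =====
-- the body of A's `for i in range(length)` loop, on state (ans, xor, mosts, map)
def most_eor_step (arr : List Int) (st : Int × Int × List Int × PySem.Dict Int Int) (i : Int) :
    Int × Int × List Int × PySem.Dict Int Int :=
  let xor := PySem.Int.bxor st.2.1 (PySem.List.pyGetD arr i 0)
  let mosts := st.2.2.1
  let map := st.2.2.2
  let mosts :=
    if map.contains xor then
      let pre := map.getD xor 0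
      PySem.List.pySetD mosts i (if pre == -1 then 1 else PySem.List.pyGetD mosts pre 0 + 1)
    else mosts
  let mosts :=
    if 0 < i then
      PySem.List.pySetD mosts i (max (PySem.List.pyGetD mosts (i - 1) 0) (PySem.List.pyGetD mosts i 0))
    else mosts
  let map := map.insert xor i
  let ans := max st.1 (PySem.List.pyGetD mosts i 0)
  (ans, xor, mosts, map)

def most_eor (arr : List Int) : Int :=
  let length : Int := PySem.List.len arr
  let mosts0 : List Int := (PySem.List.pyRange 0 length 1).map (fun _ => 0)
  let map0 : PySem.Dict Int Int := PySem.Dict.insert PySem.Dict.empty 0 (-1)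
  ((PySem.List.pyRange 0 length 1).foldl (most_eor_step arr) (0, 0, mosts0, map0)).1

-- ===== PORT B =====
-- the body of B's `for a in arr` loop, on state (count, xor, seen)
def most_eor_alt_step (st : Int × Int × PySem.Set Int) (a : Int) : Int × Int × PySem.Set Int :=
  let xor := PySem.Int.bxor st.2.1 a
  if PySem.Set.contains st.2.2 xor then (st.1 + 1, 0, PySem.Set.ofList [0])
  else (st.1, xor, PySem.Set.add st.2.2 xor)

def most_eor_alt (arr : List Int) : Int :=
  (arr.foldl most_eor_alt_step (0, 0, PySem.Set.ofList [0])).1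

-- ===== PRECONDITION & SPEC =====
def Spec_most_eor (arr : List Int) (out : Int) : Prop := out = most_eor_alt arr
instance (arr : List Int) (out : Int) : Decidable (Spec_most_eor arr out) := by unfold Spec_most_eor; infer_instance

-- ===== CLAIM (what is proved, stated in full; the proofs are below) =====
def Claim_equal_most_eor : Prop := ∀ (arr : List Int), Dom_most_eor arr → Spec_most_eor arr (most_eor arr)

-- ===== LEMMAS AND PROOFS =====

-- xor algebra for PySem.Int.bxor
theorem pv_bxor_cancel (a c : Int) : PySem.Int.bxor (PySem.Int.bxor a c) c = a := by
  unfold PySem.Int.bxor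
  by_cases ha : 0 ≤ a <;> by_cases hc : 0 ≤ c <;> split_ifs <;> simp_all <;> omega

theorem pv_bxor_assoc (a b c : Int) :
    PySem.Int.bxor (PySem.Int.bxor a b) c = PySem.Int.bxor a (PySem.Int.bxor b c) := by
  unfold PySem.Int.bxor
  by_cases ha : 0 ≤ a <;> by_cases hb : 0 ≤ b <;> by_cases hc : 0 ≤ c <;>
    split_ifs <;> simp_all [Nat.xor_assoc] <;> omega

theorem pv_bxor_inj {a b c : Int} (h : PySem.Int.bxor a c = PySem.Int.bxor b c) : a = b := by
  have := congrArg (fun x => PySem.Int.bxor x c) h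
  simpa [pv_bxor_cancel] using this

theorem pv_bxor_right_comm (a b c : Int) :
    PySem.Int.bxor (PySem.Int.bxor a b) c = PySem.Int.bxor (PySem.Int.bxor a c) b := by
  rw [pv_bxor_assoc, pv_bxor_assoc, PySem.Int.bxor_comm b c]

-- prefix xor of the first k elements
def pvX (arr : List Int) (k : Nat) : Int := (arr.take k).foldl PySem.Int.bxor 0

-- B's state after the first k elements
def pvStB (arr : List Int) (k : Nat) : Int × Int × PySem.Set Int :=
  (arr.take k).foldl most_eor_alt_step (0, 0, PySem.Set.ofList [0])

-- B's count after the first k elements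
def pvC (arr : List Int) (k : Nat) : Int := (pvStB arr k).1

-- A's state after the first k loop iterations
def pvStA (arr : List Int) (k : Nat) : Int × Int × List Int × PySem.Dict Int Int :=
  (PySem.List.pyRange 0 (k : Int) 1).foldl (most_eor_step arr)
    (0, 0, (PySem.List.pyRange 0 (PySem.List.len arr) 1).map (fun _ => 0),
     PySem.Dict.insert PySem.Dict.empty 0 (-1))

-- largest j ≤ k with pvX arr j = v (the content of A's `map`, shifted by one)
def pvLast (arr : List Int) : Nat → Int → Option Nat
  | 0, v => if (0 : Int) = v then some 0 else none
  | (k+1), v => if pvX arr (k+1) = v then some (k+1) else pvLast arr k v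

theorem pvX_zero (arr : List Int) : pvX arr 0 = 0 := rfl

theorem pvLast_succ_eq (arr : List Int) (k : Nat) (v : Int) :
    pvLast arr (k+1) v = if pvX arr (k+1) = v then some (k+1) else pvLast arr k v := rfl

theorem pvX_succ (arr : List Int) (k : Nat) (hk : k < arr.length) :
    pvX arr (k+1) = PySem.Int.bxor (pvX arr k) arr[k] := by
  unfold pvX
  rw [List.take_add_one, List.getElem?_eq_getElem hk, List.foldl_append]
  rfl

theorem pvStB_succ (arr : List Int) (k : Nat) (hk : k < arr.length) :
    pvStB arr (k+1) = most_eor_alt_step (pvStB arr k) arr[k] := by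
  unfold pvStB
  rw [List.take_add_one, List.getElem?_eq_getElem hk, List.foldl_append]
  rfl

theorem pvStA_succ (arr : List Int) (k : Nat) :
    pvStA arr (k+1) = most_eor_step arr (pvStA arr k) (k : Int) := by
  unfold pvStA
  rw [show ((k+1 : Nat) : Int) = (k : Int) + 1 by push_cast; ring,
    PySem.List.pyRange_one_succ_right (by positivity), List.foldl_append]
  simp

theorem pvC_le_succ (arr : List Int) (k : Nat) : pvC arr k ≤ pvC arr (k+1) := by
  by_cases hk : k < arr.length
  · have h := pvStB_succ arr k hk
    unfold pvC
    rw [h, most_eor_alt_step]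
    split_ifs <;> simp
  · unfold pvC pvStB
    rw [List.take_add_one, List.getElem?_eq_none (by omega)]
    simp

theorem pvC_mono (arr : List Int) {j k : Nat} (h : j ≤ k) : pvC arr j ≤ pvC arr k := by
  induction k with
  | zero =>
    have hj : j = 0 := by omega
    simp [hj]
  | succ k ih =>
    rcases Nat.lt_or_ge j (k+1) with h' | h'
    · exact le_trans (ih (by omega)) (pvC_le_succ arr k)
    · have : j = k+1 := by omega
      simp [this]

theorem pvC_zero (arr : List Int) : pvC arr 0 = 0 := rfl

theorem pvC_nonneg (arr : List Int) (k : Nat) : 0 ≤ pvC arr k := by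
  have := pvC_mono arr (Nat.zero_le k)
  simpa [pvC_zero] using this

theorem pvLast_some (arr : List Int) (k : Nat) (v : Int) {j : Nat}
    (h : pvLast arr k v = some j) :
    j ≤ k ∧ pvX arr j = v ∧ ∀ j', j < j' → j' ≤ k → pvX arr j' ≠ v := by
  induction k with
  | zero =>
    unfold pvLast at h
    split_ifs at h with h0
    · cases h; exact ⟨le_refl _, by simpa [pvX_zero] using h0, by omega⟩
  | succ k ih =>
    unfold pvLast at h
    split_ifs at h with h0
    · cases h; exact ⟨le_refl _, h0, by omega⟩
    · obtain ⟨h1, h2, h3⟩ := ih h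
      refine ⟨by omega, h2, ?_⟩
      intro j' hj1 hj2
      rcases Nat.lt_or_ge j' (k+1) with h' | h'
      · exact h3 j' hj1 (by omega)
      · have : j' = k+1 := by omega
        subst this; exact h0

theorem pvLast_ge (arr : List Int) (k : Nat) (v : Int) {j : Nat}
    (hj : j ≤ k) (hx : pvX arr j = v) :
    ∃ j', pvLast arr k v = some j' ∧ j ≤ j' := by
  induction k with
  | zero =>
    have : j = 0 := by omega
    subst this
    exact ⟨0, by unfold pvLast; rw [if_pos (by simpa [pvX_zero] using hx)], le_refl _⟩
  | succ k ih =>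
    unfold pvLast
    by_cases h0 : pvX arr (k+1) = v
    · exact ⟨k+1, by rw [if_pos h0], by omega⟩
    · rcases Nat.lt_or_ge j (k+1) with h' | h'
      · obtain ⟨j', hj', hle⟩ := ih (by omega)
        exact ⟨j', by rw [if_neg h0]; exact hj', hle⟩
      · exact absurd hx (by
          have hjk : j = k+1 := by omega
          rw [hjk]; exact h0)

-- the full loop invariant tying A's state to B's trajectory
def pvInv (arr : List Int) (k : Nat) : Prop :=
  (pvStA arr k).2.1 = pvX arr k ∧
  (∀ v, (pvStA arr k).2.2.2.get? v = (pvLast arr k v).map (fun j => (j : Int) - 1)) ∧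
  (pvStA arr k).2.2.1 =
    (List.range arr.length).map (fun i => if i+1 ≤ k then pvC arr (i+1) else 0) ∧
  (pvStA arr k).1 = pvC arr k ∧
  ∃ s, s ≤ k ∧
    (pvStB arr k).2.1 = PySem.Int.bxor (pvX arr k) (pvX arr s) ∧
    (∀ v, v ∈ (pvStB arr k).2.2 ↔
      ∃ j, s ≤ j ∧ j ≤ k ∧ v = PySem.Int.bxor (pvX arr j) (pvX arr s)) ∧
    (∀ j, s ≤ j → j ≤ k → pvC arr j = pvC arr k) ∧
    (s = 0 ∨ (0 < s ∧ pvC arr s = pvC arr (s-1) + 1))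

-- setting slot k of a range-map list, kept in range-map form
theorem pv_set_map_range (n k : Nat) (f : Nat → Int) (v : Int) :
    ((List.range n).map f).set k v = (List.range n).map (fun i => if i = k then v else f i) := by
  apply List.ext_getElem
  · simp
  · intro i h1 h2
    have hi : i < n := by simpa using h2
    simp only [List.getElem_set, List.getElem_map, List.getElem_range]
    split_ifs <;> first | rfl | omega

-- reading slot k of a range-map list through pyGetD
theorem pv_read_map_range (n k : Nat) (hk : k < n) (f : Nat → Int) :
    PySem.List.pyGetD ((List.range n).map f) ((k : Nat) : Int) 0 = f k := by
  rw [PySem.List.pyGetD_natCast, List.getD_eq_getElem _ _ (by simpa using hk)]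
  simp only [List.getElem_map, List.getElem_range]

theorem pvInv_zero (arr : List Int) : pvInv arr 0 := by
  have hA : pvStA arr 0 =
      (0, 0, (PySem.List.pyRange 0 (PySem.List.len arr) 1).map (fun _ => 0),
       PySem.Dict.insert PySem.Dict.empty 0 (-1)) := by
    unfold pvStA
    rw [show ((0:Nat):Int) = 0 by rfl, PySem.List.pyRange_one_eq_nil (le_refl 0)]
    rfl
  refine ⟨by rw [hA]; rfl, ?_, ?_, by rw [hA]; rfl, 0, le_refl _, ?_, ?_, ?_, Or.inl rfl⟩
  · intro v
    rw [hA]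
    by_cases hv : v = 0
    · simp [hv, pvLast]
    · simp [hv, pvLast, PySem.Dict.get?_insert, PySem.Dict.get?_empty, Ne.symm hv]
  · rw [hA]
    simp [PySem.List.len, PySem.List.pyRange_zero_nat, List.map_map, Function.comp_def,
      List.map_const']
  · show (0 : Int) = PySem.Int.bxor (pvX arr 0) (pvX arr 0)
    rw [PySem.Int.bxor_self]
  · intro v
    show v ∈ PySem.Set.ofList [0] ↔ _
    constructor
    · intro hv
      refine ⟨0, le_refl _, le_refl _, ?_⟩
      simp at hv
      simp [hv, PySem.Int.bxor_self]
    · rintro ⟨j, hj1, hj2, hj3⟩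
      have : j = 0 := by omega
      subst this
      simp [hj3, PySem.Int.bxor_self]
  · intro j h1 h2
    have : j = 0 := by omega
    simp [this]

theorem pvInv_succ (arr : List Int) (k : Nat) (hk : k < arr.length)
    (ih : pvInv arr k) : pvInv arr (k+1) := by
  obtain ⟨hxor, hmap, hmosts, hans, s, hsle, hBx, hBset, hCc, hCcut⟩ := ih
  have hX1 : pvX arr (k+1) = PySem.Int.bxor (pvX arr k) arr[k] := pvX_succ arr k hk
  have hgetarr : PySem.List.pyGetD arr ((k : Nat) : Int) 0 = arr[k] := by
    rw [PySem.List.pyGetD_natCast, List.getD_eq_getElem _ _ hk]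
  have hstA : pvStA arr k =
      (pvC arr k, pvX arr k,
       (List.range arr.length).map (fun i => if i+1 ≤ k then pvC arr (i+1) else 0),
       (pvStA arr k).2.2.2) := by
    rw [← hans, ← hxor, ← hmosts]
  have hA1 : pvStA arr (k+1) =
      most_eor_step arr
        (pvC arr k, pvX arr k,
         (List.range arr.length).map (fun i => if i+1 ≤ k then pvC arr (i+1) else 0),
         (pvStA arr k).2.2.2) ((k : Nat) : Int) := by
    rw [pvStA_succ, ← hstA]
  -- the new dict satisfies the pvLast characterisation whatever the branches did
  have hmap2 : ∀ v, ((pvStA arr k).2.2.2.insert (pvX arr (k+1)) ((k : Nat) : Int)).get? v =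
      (pvLast arr (k+1) v).map (fun j => (j : Int) - 1) := by
    intro v
    rw [PySem.Dict.get?_insert, pvLast_succ_eq]
    by_cases hv : v = pvX arr (k+1)
    · rw [if_pos hv, if_pos hv.symm]
      show some ((k : Nat) : Int) = some (((k+1 : Nat) : Int) - 1)
      congr 1
      push_cast
      ring
    · rw [if_neg hv, if_neg (fun h => hv h.symm), hmap v]
  -- B's membership test, restated on absolute prefixes
  have hBxa : PySem.Int.bxor (pvStB arr k).2.1 arr[k] =
      PySem.Int.bxor (pvX arr (k+1)) (pvX arr s) := by
    rw [hBx, pv_bxor_right_comm, ← hX1]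
  have hmemiff : PySem.Set.contains (pvStB arr k).2.2
        (PySem.Int.bxor (pvX arr (k+1)) (pvX arr s)) = true ↔
      ∃ j, s ≤ j ∧ j ≤ k ∧ pvX arr j = pvX arr (k+1) := by
    rw [PySem.Set.contains_iff, hBset]
    constructor
    · rintro ⟨j, h1, h2, h3⟩
      exact ⟨j, h1, h2, (pv_bxor_inj h3.symm)⟩
    · rintro ⟨j, h1, h2, h3⟩
      exact ⟨j, h1, h2, by rw [h3]⟩
  by_cases hP : ∃ j, s ≤ j ∧ j ≤ k ∧ pvX arr j = pvX arr (k+1)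
  · -- the running xor repeats inside the open segment: B cuts, A's DP gains one
    have hBc : PySem.Set.contains (pvStB arr k).2.2
        (PySem.Int.bxor (pvStB arr k).2.1 arr[k]) = true := by
      rw [hBxa]; exact hmemiff.mpr hP
    have hB2 : pvStB arr (k+1) = (pvC arr k + 1, 0, PySem.Set.ofList [0]) := by
      rw [pvStB_succ arr k hk, most_eor_alt_step]
      simp only [hBc, if_true]
      rfl
    have hck1 : pvC arr (k+1) = pvC arr k + 1 := by rw [pvC, hB2]
    obtain ⟨j, hj1, hj2, hj3⟩ := hP
    obtain ⟨j0, hL, hj0ge⟩ := pvLast_ge arr k _ hj2 hj3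
    obtain ⟨hj0k, hj0x, _⟩ := pvLast_some arr k _ hL
    have hs0 : s ≤ j0 := le_trans hj1 hj0ge
    have hcj0 : pvC arr j0 = pvC arr k := hCc j0 hs0 hj0k
    have hMcon : (pvStA arr k).2.2.2.contains (pvX arr (k+1)) = true := by
      rw [PySem.Dict.contains_eq_isSome_get?, hmap, hL]; rfl
    have hgetD : (pvStA arr k).2.2.2.getD (pvX arr (k+1)) 0 = (j0 : Int) - 1 := by
      rw [PySem.Dict.getD_eq_get?_getD, hmap, hL]; rfl
    -- B-side tail of the invariant, with the new segment start k+1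
    have hBpart : ∃ s', s' ≤ k+1 ∧
        (pvStB arr (k+1)).2.1 = PySem.Int.bxor (pvX arr (k+1)) (pvX arr s') ∧
        (∀ v, v ∈ (pvStB arr (k+1)).2.2 ↔
          ∃ j', s' ≤ j' ∧ j' ≤ k+1 ∧ v = PySem.Int.bxor (pvX arr j') (pvX arr s')) ∧
        (∀ j', s' ≤ j' → j' ≤ k+1 → pvC arr j' = pvC arr (k+1)) ∧
        (s' = 0 ∨ (0 < s' ∧ pvC arr s' = pvC arr (s'-1) + 1)) := by
      refine ⟨k+1, le_refl _, ?_, ?_, ?_, Or.inr ⟨by omega, ?_⟩⟩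
      · rw [hB2, PySem.Int.bxor_self]
      · intro v
        rw [hB2]
        show v ∈ PySem.Set.ofList [0] ↔ _
        constructor
        · intro hv
          simp at hv
          exact ⟨k+1, le_refl _, le_refl _, by simp [hv, PySem.Int.bxor_self]⟩
        · rintro ⟨j', h1, h2, h3⟩
          have : j' = k+1 := by omega
          subst this
          simp [h3, PySem.Int.bxor_self]
      · intro j' h1 h2
        have : j' = k+1 := by omega
        simp [this]
      · simpa using hck1
    simp only [most_eor_step] at hA1
    rw [hgetarr, ← hX1] at hA1
    have hmax1 : max (pvC arr k) (pvC arr k + 1) = pvC arr k + 1 := by omega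
    by_cases hj00 : j0 = 0
    · -- the repeated prefix is the empty one: A's `pre == -1` branch fires
      have hs0' : s = 0 := by omega
      have hck0 : pvC arr k = 0 := by
        have := hCc 0 (by omega) (by omega)
        rw [← this, pvC_zero]
      have hmax0 : max (pvC arr k) 1 = pvC arr k + 1 := by omega
      have hbeq : (((j0 : Nat) : Int) - 1 == -1) = true := by simp [hj00]
      by_cases hk0 : k = 0
      · subst hk0
        have hck1' : pvC arr 1 = 1 := by simpa [hck0] using hck1
        have hkneg : ¬ ((0:Int) < ((0 : Nat) : Int)) := by norm_num
        simp only [hMcon, if_true, hgetD, hbeq, if_neg hkneg,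
          PySem.List.pySetD_natCast, pv_set_map_range arr.length 0,
          pv_read_map_range arr.length 0 hk] at hA1
        refine ⟨by simp only [hA1], fun v => by simp only [hA1]; exact hmap2 v, ?_,
          by simp only [hA1]; omega, hBpart⟩
        simp only [hA1]
        refine List.map_congr_left (fun i hi => ?_)
        have hi' : i < arr.length := by simpa using hi
        by_cases hik : i = 0
        · subst hik
          simp [hck1']
        · simp only [hik, if_false]
          split_ifs <;> first | rfl | omega
      · have hkpos : (0:Int) < ((k : Nat) : Int) := by exact_mod_cast Nat.pos_of_ne_zero hk0
        have hkdx : ((k : Nat) : Int) - 1 = ((k-1 : Nat) : Int) := by omega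
        have hklt : k - 1 < arr.length := by omega
        have hkm1 : k - 1 + 1 = k := by omega
        have hkm1ne : ¬ (k - 1 = k) := by omega
        simp only [hMcon, if_true, hgetD, hbeq, if_pos hkpos, hkdx, PySem.List.pySetD_natCast,
          pv_set_map_range arr.length k, pv_read_map_range arr.length (k-1) hklt,
          pv_read_map_range arr.length k hk] at hA1
        simp only [hkm1ne, if_false, hkm1, le_refl, if_true] at hA1
        refine ⟨by simp only [hA1], fun v => by simp only [hA1]; exact hmap2 v, ?_,
          by simp only [hA1]; omega, hBpart⟩
        simp only [hA1]
        refine List.map_congr_left (fun i hi => ?_)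
        have hi' : i < arr.length := by simpa using hi
        by_cases hik : i = k
        · subst hik
          simp
          try omega
        · simp only [hik, if_false]
          split_ifs <;> first | rfl | omega
    · -- the repeated prefix is a real position j0 ≥ 1 inside the segment
      have hk1 : 1 ≤ k := by omega
      have hbeq : ((((j0 - 1 : Nat)) : Int) == -1) = false := by
        simp only [beq_eq_false_iff_ne, ne_eq]
        omega
      have hjdx : ((j0 : Nat) : Int) - 1 = ((j0-1 : Nat) : Int) := by omega
      have hkdx : ((k : Nat) : Int) - 1 = ((k-1 : Nat) : Int) := by omega
      have hkpos : (0:Int) < ((k : Nat) : Int) := by exact_mod_cast hk1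
      have hj0m1 : j0 - 1 + 1 = j0 := by omega
      have hkm1 : k - 1 + 1 = k := by omega
      have hkm1ne : ¬ (k - 1 = k) := by omega
      have hj0lt : j0 - 1 < arr.length := by omega
      have hklt : k - 1 < arr.length := by omega
      simp only [hMcon, if_true, hgetD, hbeq, Bool.false_eq_true, if_false, if_pos hkpos,
        hjdx, hkdx, PySem.List.pySetD_natCast,
        pv_set_map_range arr.length k,
        pv_read_map_range arr.length (j0-1) hj0lt,
        pv_read_map_range arr.length (k-1) hklt,
        pv_read_map_range arr.length k hk] at hA1
      simp only [hj0m1, hkm1, hkm1ne, if_false, if_pos hj0k, le_refl, if_true,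
        hcj0, hmax1] at hA1
      refine ⟨by simp only [hA1], fun v => by simp only [hA1]; exact hmap2 v, ?_,
        by simp only [hA1]; omega, hBpart⟩
      simp only [hA1]
      refine List.map_congr_left (fun i hi => ?_)
      have hi' : i < arr.length := by simpa using hi
      by_cases hik : i = k
      · subst hik
        simp
        try omega
      · simp only [hik, if_false]
        split_ifs <;> first | rfl | omega
  · -- no repeat inside the segment: B keeps scanning, A's DP stays flat
    have hBc : PySem.Set.contains (pvStB arr k).2.2
        (PySem.Int.bxor (pvStB arr k).2.1 arr[k]) = false := by
      rw [hBxa]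
      cases hc : PySem.Set.contains (pvStB arr k).2.2
          (PySem.Int.bxor (pvX arr (k+1)) (pvX arr s))
      · rfl
      · exact absurd (hmemiff.mp hc) hP
    have hB2 : pvStB arr (k+1) =
        (pvC arr k, PySem.Int.bxor (pvX arr (k+1)) (pvX arr s),
         PySem.Set.add (pvStB arr k).2.2 (PySem.Int.bxor (pvX arr (k+1)) (pvX arr s))) := by
      rw [pvStB_succ arr k hk, most_eor_alt_step]
      simp only [hBc, Bool.false_eq_true, if_false]
      rw [hBxa]
      rfl
    have hck1 : pvC arr (k+1) = pvC arr k := by rw [pvC, hB2]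
    -- B-side tail of the invariant: the segment stays open
    have hBpart : ∃ s', s' ≤ k+1 ∧
        (pvStB arr (k+1)).2.1 = PySem.Int.bxor (pvX arr (k+1)) (pvX arr s') ∧
        (∀ v, v ∈ (pvStB arr (k+1)).2.2 ↔
          ∃ j', s' ≤ j' ∧ j' ≤ k+1 ∧ v = PySem.Int.bxor (pvX arr j') (pvX arr s')) ∧
        (∀ j', s' ≤ j' → j' ≤ k+1 → pvC arr j' = pvC arr (k+1)) ∧
        (s' = 0 ∨ (0 < s' ∧ pvC arr s' = pvC arr (s'-1) + 1)) := by
      refine ⟨s, by omega, by rw [hB2], ?_, ?_, hCcut⟩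
      · intro v
        rw [hB2]
        show v ∈ PySem.Set.add (pvStB arr k).2.2 _ ↔ _
        rw [PySem.Set.mem_add, hBset v]
        constructor
        · rintro (⟨j', h1, h2, h3⟩ | hv)
          · exact ⟨j', h1, by omega, h3⟩
          · exact ⟨k+1, by omega, le_refl _, hv⟩
        · rintro ⟨j', h1, h2, h3⟩
          rcases Nat.lt_or_ge j' (k+1) with h' | h'
          · exact Or.inl ⟨j', h1, by omega, h3⟩
          · have : j' = k+1 := by omega
            subst this
            exact Or.inr h3
      · intro j' h1 h2
        rcases Nat.lt_or_ge j' (k+1) with h' | h'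
        · rw [hCc j' h1 (by omega), hck1]
        · have : j' = k+1 := by omega
          simp [this]
    simp only [most_eor_step] at hA1
    rw [hgetarr, ← hX1] at hA1
    have hnn := pvC_nonneg arr k
    rcases hL : pvLast arr k (pvX arr (k+1)) with _ | j0
    · -- the prefix xor has never been seen: A leaves mosts[k] at its running max
      have hMcon : (pvStA arr k).2.2.2.contains (pvX arr (k+1)) = false := by
        rw [PySem.Dict.contains_eq_isSome_get?, hmap, hL]; rfl
      have hknotle : ¬ (k + 1 ≤ k) := by omega
      simp only [hMcon, Bool.false_eq_true, if_false] at hA1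
      by_cases hk0 : k = 0
      · subst hk0
        have hck1' : pvC arr 1 = 0 := by simpa [pvC_zero] using hck1
        have hkneg : ¬ ((0:Int) < ((0 : Nat) : Int)) := by norm_num
        simp only [if_neg hkneg, pv_read_map_range arr.length 0 hk, hknotle, if_false] at hA1
        refine ⟨by simp only [hA1], fun v => by simp only [hA1]; exact hmap2 v, ?_,
          by simp only [hA1]; omega, hBpart⟩
        simp only [hA1]
        refine List.map_congr_left (fun i hi => ?_)
        have hi' : i < arr.length := by simpa using hi
        by_cases hik : i = 0
        · subst hik
          simp [hck1']
        · split_ifs <;> first | rfl | omega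
      · have hkpos : (0:Int) < ((k : Nat) : Int) := by exact_mod_cast Nat.pos_of_ne_zero hk0
        have hkdx : ((k : Nat) : Int) - 1 = ((k-1 : Nat) : Int) := by omega
        have hklt : k - 1 < arr.length := by omega
        have hkm1 : k - 1 + 1 = k := by omega
        have hmaxc : max (pvC arr k) 0 = pvC arr k := by omega
        simp only [if_pos hkpos, hkdx, PySem.List.pySetD_natCast,
          pv_read_map_range arr.length (k-1) hklt, pv_read_map_range arr.length k hk,
          pv_set_map_range arr.length k] at hA1
        simp only [hkm1, le_refl, if_true, hknotle, if_false, hmaxc, max_self] at hA1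
        refine ⟨by simp only [hA1], fun v => by simp only [hA1]; exact hmap2 v, ?_,
          by simp only [hA1]; omega, hBpart⟩
        simp only [hA1]
        refine List.map_congr_left (fun i hi => ?_)
        have hi' : i < arr.length := by simpa using hi
        by_cases hik : i = k
        · subst hik
          simp
          omega
        · simp only [hik, if_false]
          split_ifs <;> first | rfl | omega
    · -- seen only before the current segment opened: A's candidate cannot beat the max
      obtain ⟨hj0k, hj0x, _⟩ := pvLast_some arr k _ hL
      have hj0s : j0 < s := by
        by_contra h
        exact hP ⟨j0, by omega, hj0k, hj0x⟩
      rcases hCcut with h0 | ⟨hs1, hcs⟩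
      · omega
      have hcks : pvC arr k = pvC arr (s-1) + 1 := by
        rw [← (hCc s (le_refl s) hsle), hcs]
      have hcj0le : pvC arr j0 ≤ pvC arr (s-1) := pvC_mono arr (by omega)
      have hsm1nn := pvC_nonneg arr (s-1)
      have hk1 : 1 ≤ k := by omega
      have hMcon : (pvStA arr k).2.2.2.contains (pvX arr (k+1)) = true := by
        rw [PySem.Dict.contains_eq_isSome_get?, hmap, hL]; rfl
      have hgetD : (pvStA arr k).2.2.2.getD (pvX arr (k+1)) 0 = ((j0 : Nat) : Int) - 1 := by
        rw [PySem.Dict.getD_eq_get?_getD, hmap, hL]; rfl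
      have hkpos : (0:Int) < ((k : Nat) : Int) := by exact_mod_cast hk1
      have hkdx : ((k : Nat) : Int) - 1 = ((k-1 : Nat) : Int) := by omega
      have hklt : k - 1 < arr.length := by omega
      have hkm1 : k - 1 + 1 = k := by omega
      have hkm1ne : ¬ (k - 1 = k) := by omega
      by_cases hj00 : j0 = 0
      · have hbeq : (((j0 : Nat) : Int) - 1 == -1) = true := by simp [hj00]
        have hmaxv : max (pvC arr k) 1 = pvC arr k := by omega
        simp only [hMcon, if_true, hgetD, hbeq, if_pos hkpos, hkdx, PySem.List.pySetD_natCast,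
          pv_set_map_range arr.length k, pv_read_map_range arr.length (k-1) hklt,
          pv_read_map_range arr.length k hk] at hA1
        simp only [hkm1ne, if_false, hkm1, le_refl, if_true, hmaxv, max_self] at hA1
        refine ⟨by simp only [hA1], fun v => by simp only [hA1]; exact hmap2 v, ?_,
          by simp only [hA1]; omega, hBpart⟩
        simp only [hA1]
        refine List.map_congr_left (fun i hi => ?_)
        have hi' : i < arr.length := by simpa using hi
        by_cases hik : i = k
        · subst hik
          simp
          omega
        · simp only [hik, if_false]
          split_ifs <;> first | rfl | omega
      · have hbeq : ((((j0 - 1 : Nat)) : Int) == -1) = false := by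
          simp only [beq_eq_false_iff_ne, ne_eq]
          omega
        have hjdx : ((j0 : Nat) : Int) - 1 = ((j0-1 : Nat) : Int) := by omega
        have hj0m1 : j0 - 1 + 1 = j0 := by omega
        have hj0lt : j0 - 1 < arr.length := by omega
        have hmaxv : max (pvC arr k) (pvC arr j0 + 1) = pvC arr k := by omega
        simp only [hMcon, if_true, hgetD, if_pos hkpos, hjdx, hbeq, Bool.false_eq_true,
          if_false, hkdx, PySem.List.pySetD_natCast,
          pv_set_map_range arr.length k,
          pv_read_map_range arr.length (j0-1) hj0lt,
          pv_read_map_range arr.length (k-1) hklt,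
          pv_read_map_range arr.length k hk] at hA1
        simp only [hj0m1, hkm1, hkm1ne, if_false, if_pos hj0k, le_refl, if_true,
          hmaxv, max_self] at hA1
        refine ⟨by simp only [hA1], fun v => by simp only [hA1]; exact hmap2 v, ?_,
          by simp only [hA1]; omega, hBpart⟩
        simp only [hA1]
        refine List.map_congr_left (fun i hi => ?_)
        have hi' : i < arr.length := by simpa using hi
        by_cases hik : i = k
        · subst hik
          simp
          omega
        · simp only [hik, if_false]
          split_ifs <;> first | rfl | omega

theorem pvInv_all (arr : List Int) (k : Nat) (hk : k ≤ arr.length) : pvInv arr k := by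
  induction k with
  | zero => exact pvInv_zero arr
  | succ k ih => exact pvInv_succ arr k (by omega) (ih (by omega))

-- ===== VERDICT (by name: the statement is the Claim_ definition above) =====
theorem most_eor_spec : Claim_equal_most_eor := by
  intro arr _
  unfold Spec_most_eor most_eor most_eor_alt
  have h := (pvInv_all arr arr.length (le_refl _)).2.2.2.1
  have hB : (arr.foldl most_eor_alt_step (0, 0, PySem.Set.ofList [0])).1 = pvC arr arr.length := by
    unfold pvC pvStB
    rw [List.take_length]
  rw [hB]
  simpa [pvStA, PySem.List.len] using h
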